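-- pv_equiv track=rewrite | github.com/tupsvet/config-2 | visualizer.py | generate_graph_code
-- ===== SOURCE A (Python) =====
-- def generate_graph_code(package_dict):
--     res = 'flowchart TD;\n'
--     cnt = 0
--     ids = {}
--
--     for key in package_dict.keys():
--         if package_dict[key] is None:
--             continue
--         if key in ids:
--             cur_id = ids[key]
--         else:
--             cur_id = f'id{cnt}'
--             ids[key] = cur_id
--             cnt += 1
--         for dep in package_dict[key]:
--             if dep in ids:
--                 dep_id = ids[dep]
--             else:
--                 dep_id = f'id{cnt}'
--                 ids[dep] = dep_id
--                 cnt += 1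
--             res += f'\t{cur_id}["{key}"] --> {dep_id}["{dep}"];\n'
--     return res
-- ===== SOURCE B (Python) =====
-- def generate_graph_code(package_dict):
--     items = [(k, deps) for k, deps in package_dict.items() if deps is not None]
--     ids = {}
--     for k, deps in items:
--         for name in (k, *deps):
--             if name not in ids:
--                 ids[name] = f'id{len(ids)}'
--     lines = [f'\t{ids[k]}["{k}"] --> {ids[d]}["{d}"];\n' for k, deps in items for d in deps]
--     return 'flowchart TD;\n' + ''.join(lines)
-- ===== Notes on version B (the rewrite author's own statement) =====
-- stated objective: alternative
-- what changed: A builds ids and the result string interleaved in one nested loop with an explicit counter; B filters the items once, assigns first-appearance ids in a separate pass keyed by len(ids), then emits all edge lines as a comprehension joined at the end.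
import Mathlib
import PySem

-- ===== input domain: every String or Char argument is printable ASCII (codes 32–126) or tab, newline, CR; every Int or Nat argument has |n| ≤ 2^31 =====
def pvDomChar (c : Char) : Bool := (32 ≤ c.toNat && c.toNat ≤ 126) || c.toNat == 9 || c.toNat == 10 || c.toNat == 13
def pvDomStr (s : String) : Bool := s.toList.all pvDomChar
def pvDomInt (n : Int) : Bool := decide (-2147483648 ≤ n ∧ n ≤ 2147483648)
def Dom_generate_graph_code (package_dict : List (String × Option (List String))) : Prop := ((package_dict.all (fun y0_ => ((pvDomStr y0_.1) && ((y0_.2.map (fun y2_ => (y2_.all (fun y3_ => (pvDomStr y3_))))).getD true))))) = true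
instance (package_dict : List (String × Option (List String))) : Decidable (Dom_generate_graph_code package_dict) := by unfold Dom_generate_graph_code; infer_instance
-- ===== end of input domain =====

-- B re-implements A as two passes (first-appearance id assignment, then edge emission) with
-- len(ids) as the id counter; same return value, different decomposition (objective: alternative).

-- ===== PORT A =====
-- the edge line f'\t{cur_id}["{key}"] --> {dep_id}["{dep}"];\n' (both Pythons build this same string)
def pvLine (cur_id key dep_id dep : String) : String :=
  "\t" ++ cur_id ++ "[\"" ++ key ++ "\"] --> " ++ dep_id ++ "[\"" ++ dep ++ "\"];\n"

-- body of A's inner loop `for dep in package_dict[key]:` over the state (res, cnt, ids)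
def pvStepA (key cur_id : String) (st : String × Int × PySem.Dict String String)
    (dep : String) : String × Int × PySem.Dict String String :=
  match st with
  | (res, cnt, ids) =>
    if ids.contains dep then
      (res ++ pvLine cur_id key (ids.getD dep "") dep, cnt, ids)
    else
      let dep_id := "id" ++ PySem.Int.toStr cnt
      (res ++ pvLine cur_id key dep_id dep, cnt + 1, ids.insert dep dep_id)

-- body of A's outer loop `for key in package_dict.keys():`; a dict's keys are unique
-- (Pre_ below), so iterating keys() and looking each key up visits the (key, value) pairs in order
def pvItemA (st : String × Int × PySem.Dict String String)
    (p : String × Option (List String)) : String × Int × PySem.Dict String String :=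
  match p.2 with
  | none => st
  | some deps =>
    match st with
    | (res, cnt, ids) =>
      if ids.contains p.1 then
        deps.foldl (pvStepA p.1 (ids.getD p.1 "")) (res, cnt, ids)
      else
        let cur_id := "id" ++ PySem.Int.toStr cnt
        deps.foldl (pvStepA p.1 cur_id) (res, cnt + 1, ids.insert p.1 cur_id)

def generate_graph_code (package_dict : List (String × Option (List String))) : String :=
  (package_dict.foldl pvItemA ("flowchart TD;\n", 0, PySem.Dict.empty)).1

-- ===== PORT B =====
-- [(k, deps) for k, deps in package_dict.items() if deps is not None]
def pvItems (package_dict : List (String × Option (List String))) : List (String × List String) :=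
  package_dict.filterMap (fun p => p.2.map (fun deps => (p.1, deps)))

-- inner loop of B's first pass: assign fresh ids (f'id{len(ids)}') to unseen names
def pvAssign (d : PySem.Dict String String) (names : List String) : PySem.Dict String String :=
  names.foldl (fun d name =>
    if d.contains name then d else d.insert name ("id" ++ PySem.Int.toStr (d.size : Int))) d

-- B's first pass over the filtered items (generalized start dict for the proofs)
def pvIdsFrom (d : PySem.Dict String String) (items : List (String × List String)) :
    PySem.Dict String String :=
  items.foldl (fun d p => pvAssign d (p.1 :: p.2)) d

def generate_graph_code_alt (package_dict : List (String × Option (List String))) : String :=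
  let items := pvItems package_dict
  let ids := pvIdsFrom PySem.Dict.empty items
  -- ids[k] / ids[d] in the comprehension: every such name got an id in the first pass,
  -- so the lookup never fails; ported as getD with an irrelevant default
  let lines := items.flatMap (fun p =>
    p.2.map (fun dep => pvLine (ids.getD p.1 "") p.1 (ids.getD dep "") dep))
  "flowchart TD;\n" ++ PySem.Str.join "" lines

-- ===== PRECONDITION & SPEC =====
-- Pre_ excludes association lists with duplicate keys: they do not arise from any Python dict
-- (A's parameter is a dict, whose keys are unique), so nothing is claimed about them.
def Pre_generate_graph_code (package_dict : List (String × Option (List String))) : Prop :=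
  (package_dict.map Prod.fst).Nodup

instance (package_dict : List (String × Option (List String))) : Decidable (Pre_generate_graph_code package_dict) := by
  unfold Pre_generate_graph_code; infer_instance

def pvWitness_generate_graph_code : (List (String × Option (List String))) :=
  [("a", some ["b", "a"]), ("b", none), ("c", some ["b"])]

def Spec_generate_graph_code (package_dict : List (String × Option (List String))) (out : String) : Prop := out = generate_graph_code_alt package_dict
instance (package_dict : List (String × Option (List String))) (out : String) : Decidable (Spec_generate_graph_code package_dict out) := by unfold Spec_generate_graph_code; infer_instance

-- ===== CLAIM (what is proved, stated in full; the proofs are below) =====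
def Claim_equal_generate_graph_code : Prop := ∀ (package_dict : List (String × Option (List String))), Dom_generate_graph_code package_dict → Pre_generate_graph_code package_dict → Spec_generate_graph_code package_dict (generate_graph_code package_dict)

-- ===== LEMMAS AND PROOFS =====

-- d' extends d: every key present in d has the same value in d'
def pvExt (d d' : PySem.Dict String String) : Prop :=
  ∀ k v, d.get? k = some v → d'.get? k = some v

theorem pvExt_refl (d : PySem.Dict String String) : pvExt d d := fun _ _ h => h

theorem pvExt_trans {d₁ d₂ d₃ : PySem.Dict String String}
    (h₁ : pvExt d₁ d₂) (h₂ : pvExt d₂ d₃) : pvExt d₁ d₃ :=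
  fun k v h => h₂ k v (h₁ k v h)

theorem pvExt_insert_fresh (d : PySem.Dict String String) (k : String) (v : String)
    (h : d.contains k = false) : pvExt d (d.insert k v) := by
  intro k' v' hk'
  rw [PySem.Dict.get?_insert]
  split
  · rename_i he; subst he
    rw [PySem.Dict.contains_eq_isSome_get?, hk'] at h; simp at h
  · exact hk'

theorem pvExt_assign (d : PySem.Dict String String) (names : List String) :
    pvExt d (pvAssign d names) := by
  induction names generalizing d with
  | nil => exact pvExt_refl d
  | cons n ns ih =>
    simp only [pvAssign, List.foldl_cons]
    by_cases h : d.contains n = true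
    · rw [if_pos h]; exact ih d
    · rw [if_neg h]
      exact pvExt_trans (pvExt_insert_fresh d n _ (by simpa using h)) (ih _)

theorem pvExt_idsFrom (d : PySem.Dict String String) (items : List (String × List String)) :
    pvExt d (pvIdsFrom d items) := by
  induction items generalizing d with
  | nil => exact pvExt_refl d
  | cons p ps ih =>
    simp only [pvIdsFrom, List.foldl_cons]
    exact pvExt_trans (pvExt_assign d (p.1 :: p.2)) (ih _)

theorem pvExt_getD {d dF : PySem.Dict String String} (h : pvExt d dF) {k : String}
    (hc : d.contains k = true) : dF.getD k "" = d.getD k "" := by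
  rw [PySem.Dict.contains_eq_isSome_get?] at hc
  cases hv : d.get? k with
  | none => rw [hv] at hc; simp at hc
  | some v =>
    rw [PySem.Dict.getD_of_get?_eq_some _ _ hv, PySem.Dict.getD_of_get?_eq_some _ _ (h k v hv)]

theorem pvJoin_cons (x : String) (xs : List String) :
    PySem.Str.join "" (x :: xs) = x ++ PySem.Str.join "" xs := by
  cases xs with
  | nil => simp [PySem.Str.join, PySem.Chars.join, List.intercalate]
  | cons y ys => simp [PySem.Str.join, PySem.Chars.join, List.intercalate]

theorem pvJoin_nil : PySem.Str.join "" ([] : List String) = "" := by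
  simp [PySem.Str.join, PySem.Chars.join, List.intercalate]

theorem pvJoin_append (xs ys : List String) :
    PySem.Str.join "" (xs ++ ys) = PySem.Str.join "" xs ++ PySem.Str.join "" ys := by
  induction xs with
  | nil => simp [pvJoin_nil]
  | cons x xs ih => simp [pvJoin_cons, ih, String.append_assoc]

-- A's inner dep-loop: emits the same lines as B's comprehension (looked up in any extension dF
-- of the assigned dict) and updates (cnt, ids) exactly as B's first-pass inner loop does
theorem pvInner (key cur_id : String) (deps : List String) :
    ∀ (res : String) (cnt : Int) (d dF : PySem.Dict String String),
      cnt = (d.size : Int) → pvExt (pvAssign d deps) dF →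
      deps.foldl (pvStepA key cur_id) (res, cnt, d) =
        (res ++ PySem.Str.join "" (deps.map (fun dep => pvLine cur_id key (dF.getD dep "") dep)),
         ((pvAssign d deps).size : Int), pvAssign d deps) := by
  induction deps with
  | nil =>
    intro res cnt d dF hc hE
    simp [pvAssign, pvJoin_nil, String.append_empty, hc]
  | cons dep rest ih =>
    intro res cnt d dF hc hE
    have hAcons : pvAssign d (dep :: rest) =
        pvAssign (if d.contains dep then d
                  else d.insert dep ("id" ++ PySem.Int.toStr (d.size : Int))) rest := rfl
    by_cases h : d.contains dep = true
    · have hA : pvAssign d (dep :: rest) = pvAssign d rest := by rw [hAcons, if_pos h]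
      have hE' : pvExt (pvAssign d rest) dF := hA ▸ hE
      have hdF : dF.getD dep "" = d.getD dep "" :=
        pvExt_getD (pvExt_trans (pvExt_assign d rest) hE') h
      rw [List.foldl_cons]
      show rest.foldl (pvStepA key cur_id) (pvStepA key cur_id (res, cnt, d) dep) = _
      rw [show pvStepA key cur_id (res, cnt, d) dep =
            (res ++ pvLine cur_id key (d.getD dep "") dep, cnt, d) by simp [pvStepA, h]]
      rw [ih _ cnt d dF hc hE', hA]
      simp [pvJoin_cons, String.append_assoc, hdF]
    · have hb : d.contains dep = false := by simpa using h
      have hid : ("id" ++ PySem.Int.toStr (d.size : Int)) = "id" ++ PySem.Int.toStr cnt := by rw [hc]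
      have hA : pvAssign d (dep :: rest) =
          pvAssign (d.insert dep ("id" ++ PySem.Int.toStr cnt)) rest := by
        rw [hAcons, if_neg h, hid]
      have hE' : pvExt (pvAssign (d.insert dep ("id" ++ PySem.Int.toStr cnt)) rest) dF := hA ▸ hE
      have hsz : cnt + 1 = (((d.insert dep ("id" ++ PySem.Int.toStr cnt)).size : Nat) : Int) := by
        rw [PySem.Dict.size_insert, if_neg (by simp [hb])]
        push_cast
        omega
      have hdF : dF.getD dep "" = "id" ++ PySem.Int.toStr cnt := by
        have hget : (d.insert dep ("id" ++ PySem.Int.toStr cnt)).get? dep =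
            some ("id" ++ PySem.Int.toStr cnt) := PySem.Dict.get?_insert_self _ _ _
        exact PySem.Dict.getD_of_get?_eq_some _ _
          (pvExt_trans (pvExt_assign _ rest) hE' dep _ hget)
      rw [List.foldl_cons]
      show rest.foldl (pvStepA key cur_id) (pvStepA key cur_id (res, cnt, d) dep) = _
      rw [show pvStepA key cur_id (res, cnt, d) dep =
            (res ++ pvLine cur_id key ("id" ++ PySem.Int.toStr cnt) dep, cnt + 1,
             d.insert dep ("id" ++ PySem.Int.toStr cnt)) by simp [pvStepA, hb]]
      rw [ih _ (cnt + 1) _ dF hsz hE', hA]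
      simp [pvJoin_cons, String.append_assoc, hdF]

-- A's whole loop against B's two passes, generalized over the running state
theorem pvOuter (pd : List (String × Option (List String))) :
    ∀ (res : String) (cnt : Int) (d dF : PySem.Dict String String),
      cnt = (d.size : Int) → pvExt (pvIdsFrom d (pvItems pd)) dF →
      pd.foldl pvItemA (res, cnt, d) =
        (res ++ PySem.Str.join "" ((pvItems pd).flatMap (fun p =>
           p.2.map (fun dep => pvLine (dF.getD p.1 "") p.1 (dF.getD dep "") dep))),
         ((pvIdsFrom d (pvItems pd)).size : Int), pvIdsFrom d (pvItems pd)) := by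
  induction pd with
  | nil =>
    intro res cnt d dF hc hE
    simp [pvItems, pvIdsFrom, pvJoin_nil, String.append_empty, hc]
  | cons p ps ih =>
    intro res cnt d dF hc hE
    cases hp : p.2 with
    | none =>
      have hItems : pvItems (p :: ps) = pvItems ps := by simp [pvItems, hp]
      rw [hItems] at hE ⊢
      rw [List.foldl_cons,
        show pvItemA (res, cnt, d) p = (res, cnt, d) by simp [pvItemA, hp]]
      exact ih res cnt d dF hc hE
    | some deps =>
      have hItems : pvItems (p :: ps) = (p.1, deps) :: pvItems ps := by simp [pvItems, hp]
      rw [hItems] at hE ⊢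
      have hIcons : ∀ d0, pvIdsFrom d0 ((p.1, deps) :: pvItems ps) =
          pvIdsFrom (pvAssign d0 (p.1 :: deps)) (pvItems ps) := fun _ => rfl
      have hAcons : pvAssign d (p.1 :: deps) =
          pvAssign (if d.contains p.1 then d
                    else d.insert p.1 ("id" ++ PySem.Int.toStr (d.size : Int))) deps := rfl
      by_cases h : d.contains p.1 = true
      · have hA : pvAssign d (p.1 :: deps) = pvAssign d deps := by rw [hAcons, if_pos h]
        have hE' : pvExt (pvIdsFrom (pvAssign d deps) (pvItems ps)) dF := by
          rw [hIcons, hA] at hE; exact hE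
        have hEin : pvExt (pvAssign d deps) dF :=
          pvExt_trans (pvExt_idsFrom _ (pvItems ps)) hE'
        have hkey : dF.getD p.1 "" = d.getD p.1 "" :=
          pvExt_getD (pvExt_trans (pvExt_assign d deps) hEin) h
        rw [List.foldl_cons,
          show pvItemA (res, cnt, d) p =
              deps.foldl (pvStepA p.1 (d.getD p.1 "")) (res, cnt, d) by
            simp [pvItemA, hp, h]]
        rw [pvInner p.1 (d.getD p.1 "") deps res cnt d dF hc hEin]
        rw [ih _ _ _ dF rfl hE']
        rw [hIcons, hA]
        simp [pvJoin_append, String.append_assoc, hkey]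
      · have hb : d.contains p.1 = false := by simpa using h
        have hid : ("id" ++ PySem.Int.toStr (d.size : Int)) = "id" ++ PySem.Int.toStr cnt := by
          rw [hc]
        have hA : pvAssign d (p.1 :: deps) =
            pvAssign (d.insert p.1 ("id" ++ PySem.Int.toStr cnt)) deps := by
          rw [hAcons, if_neg h, hid]
        have hsz : cnt + 1 = (((d.insert p.1 ("id" ++ PySem.Int.toStr cnt)).size : Nat) : Int) := by
          rw [PySem.Dict.size_insert, if_neg (by simp [hb])]
          push_cast
          omega
        have hE' : pvExt (pvIdsFrom (pvAssign (d.insert p.1 ("id" ++ PySem.Int.toStr cnt)) deps)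
            (pvItems ps)) dF := by
          rw [hIcons, hA] at hE; exact hE
        have hEin : pvExt (pvAssign (d.insert p.1 ("id" ++ PySem.Int.toStr cnt)) deps) dF :=
          pvExt_trans (pvExt_idsFrom _ (pvItems ps)) hE'
        have hkey : dF.getD p.1 "" = "id" ++ PySem.Int.toStr cnt := by
          have hget : (d.insert p.1 ("id" ++ PySem.Int.toStr cnt)).get? p.1 =
              some ("id" ++ PySem.Int.toStr cnt) := PySem.Dict.get?_insert_self _ _ _
          exact PySem.Dict.getD_of_get?_eq_some _ _
            (pvExt_trans (pvExt_assign _ deps) hEin p.1 _ hget)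
        rw [List.foldl_cons,
          show pvItemA (res, cnt, d) p =
              deps.foldl (pvStepA p.1 ("id" ++ PySem.Int.toStr cnt))
                (res, cnt + 1, d.insert p.1 ("id" ++ PySem.Int.toStr cnt)) by
            simp [pvItemA, hp, hb]]
        rw [pvInner p.1 ("id" ++ PySem.Int.toStr cnt) deps res (cnt + 1) _ dF hsz hEin]
        rw [ih _ _ _ dF rfl hE']
        rw [hIcons, hA]
        simp [pvJoin_append, String.append_assoc, hkey]

-- ===== VERDICT (by name: the statement is the Claim_ definition above) =====
theorem generate_graph_code_spec : Claim_equal_generate_graph_code := by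
  intro pd _ _
  unfold Spec_generate_graph_code generate_graph_code generate_graph_code_alt
  rw [pvOuter pd "flowchart TD;\n" 0 PySem.Dict.empty (pvIdsFrom PySem.Dict.empty (pvItems pd))
        (by simp [PySem.Dict.size_empty]) (pvExt_refl _)]
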